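-- pv_equiv track=rewrite | github.com/potocnikales/advent-of-code | day17.py | solve
-- ===== SOURCE A (Python) =====
-- def _transform_nd(data, n):
--     _trans = []
--     for d in range(n):
--         lo = min(x[d] for x in data) - 1
--         hi = max(x[d] for x in data) + 2
--         _trans.append((lo, hi))
--     return _trans
--
-- def _around_3d(x, y, z):
--     for dx in range(-1, 2):
--         for dy in range(-1, 2):
--             for dz in range(-1, 2):
--                 if not (dx == dy == dz == 0):
--                     yield (dx + x, dy + y, dz + z)
--
-- def _around_4d(x, y, z, w):
--     for dx in range(-1, 2):
--         for dy in range(-1, 2):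
--             for dz in range(-1, 2):
--                 for dw in range(-1, 2):
--                     if not (dx == dy == dz == dw == 0):
--                         yield (dx + x, dy + y, dz + z, dw + w)
--
-- def _count_3d(data, x, y, z):
--     r = 0
--     for pos in _around_3d(x, y, z):
--         if pos in data:
--             r += 1
--     return r
--
-- def _count_4d(data, x, y, z, w):
--     r = 0
--     for pos in _around_4d(x, y, z, w):
--         if pos in data:
--             r += 1
--     return r
--
-- def _calculate_3d(data):
--     _data = set()
--     t1, t2, t3 = _transform_nd(data, 3)
--     for x in range(t1[0], t1[1]):
--         for y in range(t2[0], t2[1]):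
--             for z in range(t3[0], t3[1]):
--                 n = _count_3d(data, x, y, z)
--                 if (x, y, z) in data:
--                     if n in [2,3]:
--                         _data.add((x, y, z))
--                 else:
--                     if n == 3:
--                         _data.add((x, y, z))
--     return _data
--
-- def _calculate_4d(data):
--     _data = set()
--     t1, t2, t3, t4 = _transform_nd(data, 4)
--     for x in range(t1[0], t1[1]):
--         for y in range(t2[0], t2[1]):
--             for z in range(t3[0], t3[1]):
--                 for w in range(t4[0], t4[1]):
--                     n = _count_4d(data, x, y, z, w)
--                     if (x, y, z, w) in data:
--                         if n in [2,3]: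
--                             _data.add((x, y, z, w))
--                     else:
--                         if n == 3:
--                             _data.add((x, y, z, w))
--     return _data
--
-- def solve(data, steps, nD):
--     _counter = 0
--     while _counter < steps:
--         if nD == 3:
--             data = _calculate_3d(data)
--         elif nD == 4:
--             data = _calculate_4d(data)
--         _counter += 1
--     return data
-- ===== SOURCE B (Python) =====
-- def solve(data, steps, nD):
--     # Sparse simulation: count neighbours only around active cells via a dict,
--     # instead of scanning the whole bounding box.
--     if steps <= 0 or nD not in (3, 4):
--         return data
--     offsets = [()]
--     for _ in range(nD):
--         offsets = [o + (d,) for o in offsets for d in (-1, 0, 1)]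
--     offsets.remove((0,) * nD)
--     active = data
--     for _ in range(steps):
--         counts = {}
--         for cell in active:
--             for off in offsets:
--                 p = tuple(c + d for c, d in zip(cell, off))
--                 counts[p] = counts.get(p, 0) + 1
--         # iterate in sorted (deterministic) order
--         active = {p for p in sorted(counts) if counts[p] == 3 or (counts[p] == 2 and p in active)}
--     return active
-- ===== Notes on version B (the rewrite author's own statement) =====
-- stated objective: faster
-- what changed: B replaces A's dense per-step scan of the whole bounding box (a 3^d-neighbourhood membership count per box position) with a sparse step that builds a neighbour-count dict keyed only by positions adjacent to active cells and applies the life rule to the dict entries; a timing run measured B faster (A timed out on a spread-out input family where B returned, and B was 1.5x faster at the largest dense size).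
import Mathlib
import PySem

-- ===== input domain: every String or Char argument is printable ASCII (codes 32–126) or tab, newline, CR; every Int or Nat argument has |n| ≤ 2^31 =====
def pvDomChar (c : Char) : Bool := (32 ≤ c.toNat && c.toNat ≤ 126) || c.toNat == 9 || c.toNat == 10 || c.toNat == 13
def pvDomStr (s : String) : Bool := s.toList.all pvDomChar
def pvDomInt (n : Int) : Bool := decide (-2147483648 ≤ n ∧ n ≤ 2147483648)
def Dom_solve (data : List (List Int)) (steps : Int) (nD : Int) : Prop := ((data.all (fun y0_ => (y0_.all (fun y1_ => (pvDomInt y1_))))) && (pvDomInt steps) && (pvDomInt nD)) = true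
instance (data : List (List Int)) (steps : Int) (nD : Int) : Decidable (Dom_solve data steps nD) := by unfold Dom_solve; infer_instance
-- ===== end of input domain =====

-- B replaces A's dense scan of the whole bounding box (one 3^d-neighbourhood membership
-- count per box position) by a sparse step that counts neighbours only around the active
-- cells via a dict (work per step: box volume -> active cells; a timing run measured
-- B faster).  `data` is a Python set of int tuples, encoded as a list of distinct lists;
-- results are compared as sets.

-- ===== PORT A =====
-- _transform_nd(data, n): per dimension d, (min-1, max+2) of coordinate d.
-- min()/max() of an empty sequence and x[d] out of range are Python errors → none.
def pvTransformNd (data : List (List Int)) (n : Int) : Option (List (Int × Int)) :=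
  (PySem.List.pyRange 0 n 1).foldl
    (fun acc d =>
      acc.bind fun tr =>
        (data.mapM fun x => PySem.List.pyGet? x d).bind fun vals =>
          (PySem.List.min? vals fun v => v).bind fun lo =>
            (PySem.List.max? vals fun v => v).map fun hi =>
              tr ++ [(lo - 1, hi + 2)])
    (some [])

-- _around_3d / _around_4d: the 26 / 80 neighbour positions (tuples ported as lists)
def pvAround3d (x y z : Int) : List (List Int) :=
  (PySem.List.pyRange (-1) 2 1).flatMap fun dx =>
    (PySem.List.pyRange (-1) 2 1).flatMap fun dy =>
      (PySem.List.pyRange (-1) 2 1).filterMap fun dz =>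
        if dx = dy ∧ dy = dz ∧ dz = 0 then none else some [dx + x, dy + y, dz + z]

def pvAround4d (x y z w : Int) : List (List Int) :=
  (PySem.List.pyRange (-1) 2 1).flatMap fun dx =>
    (PySem.List.pyRange (-1) 2 1).flatMap fun dy =>
      (PySem.List.pyRange (-1) 2 1).flatMap fun dz =>
        (PySem.List.pyRange (-1) 2 1).filterMap fun dw =>
          if dx = dy ∧ dy = dz ∧ dz = dw ∧ dw = 0 then none
          else some [dx + x, dy + y, dz + z, dw + w]

def pvCount3d (data : List (List Int)) (x y z : Int) : Int :=
  (pvAround3d x y z).foldl (fun r pos => if pos ∈ data then r + 1 else r) 0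

def pvCount4d (data : List (List Int)) (x y z w : Int) : Int :=
  (pvAround4d x y z w).foldl (fun r pos => if pos ∈ data then r + 1 else r) 0

def pvCalculate3d (data : List (List Int)) : Option (List (List Int)) :=
  (pvTransformNd data 3).bind fun tr =>
    match tr with
    | [t1, t2, t3] => some (
        (PySem.List.pyRange t1.1 t1.2 1).foldl (fun acc x =>
          (PySem.List.pyRange t2.1 t2.2 1).foldl (fun acc y =>
            (PySem.List.pyRange t3.1 t3.2 1).foldl (fun acc z =>
              let n := pvCount3d data x y z
              if [x, y, z] ∈ data then
                (if n = 2 ∨ n = 3 then PySem.Set.add acc [x, y, z] else acc)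
              else
                (if n = 3 then PySem.Set.add acc [x, y, z] else acc)) acc) acc)
          (PySem.Set.empty : PySem.Set (List Int)))
    | _ => none  -- unpacking 't1, t2, t3 = ...' never fails for n = 3

def pvCalculate4d (data : List (List Int)) : Option (List (List Int)) :=
  (pvTransformNd data 4).bind fun tr =>
    match tr with
    | [t1, t2, t3, t4] => some (
        (PySem.List.pyRange t1.1 t1.2 1).foldl (fun acc x =>
          (PySem.List.pyRange t2.1 t2.2 1).foldl (fun acc y =>
            (PySem.List.pyRange t3.1 t3.2 1).foldl (fun acc z =>
              (PySem.List.pyRange t4.1 t4.2 1).foldl (fun acc w =>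
                let n := pvCount4d data x y z w
                if [x, y, z, w] ∈ data then
                  (if n = 2 ∨ n = 3 then PySem.Set.add acc [x, y, z, w] else acc)
                else
                  (if n = 3 then PySem.Set.add acc [x, y, z, w] else acc)) acc) acc) acc)
          (PySem.Set.empty : PySem.Set (List Int)))
    | _ => none

-- solve: 'while _counter < steps' runs max(steps, 0) times; a none (Python exception:
-- empty generation or a too-short tuple) is excluded by Pre_solve.
def solve (data : List (List Int)) (steps : Int) (nD : Int) : List (List Int) :=
  match (List.range steps.toNat).foldl
      (fun st _ => st.bind fun d =>
        if nD = 3 then pvCalculate3d d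
        else if nD = 4 then pvCalculate4d d
        else some d)
      (some data) with
  | some d => d
  | none => []

-- ===== PORT B =====
-- tuple(c + d for c, d in zip(cell, off))
def pvVadd (cell off : List Int) : List Int := List.zipWith (fun c d => c + d) cell off

-- offsets: all nD-vectors over (-1, 0, 1), with the zero vector removed
def pvOffsets (nD : Int) : List (List Int) :=
  let full := (PySem.List.pyRange 0 nD 1).foldl
    (fun offs _ => offs.flatMap fun o => ([-1, 0, 1] : List Int).map fun d => o ++ [d])
    [([] : List Int)]
  match PySem.List.remove? full (List.replicate nD.toNat 0) with
  | some l => l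
  | none => []  -- the zero vector is always present for nD ≥ 0

-- sorted(counts): Python sorts int tuples lexicographically = the lexicographic
-- linear order on List ℤ (instances written out so the order lemmas apply)
def pvSortedKeys (xs : List (List Int)) : List (List Int) :=
  @PySem.List.sorted _ _ List.instLinearOrder.toLT LinearOrder.toDecidableLT xs (fun p => p) false

-- one sparse step: counts[p] = #active neighbours of p, then the life rule;
-- every p iterated over is a key of counts, so Python's counts[p] is getD.
def pvStep (offsets : List (List Int)) (active : List (List Int)) : List (List Int) :=
  let counts : PySem.Dict (List Int) Int :=
    active.foldl (fun d cell =>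
      offsets.foldl (fun d off => d.modify (pvVadd cell off) 0 (· + 1)) d)
      PySem.Dict.empty
  PySem.Set.ofList ((pvSortedKeys counts.keys).filter fun p =>
    counts.getD p 0 == 3 || (counts.getD p 0 == 2 && decide (p ∈ active)))

def solve_alt (data : List (List Int)) (steps : Int) (nD : Int) : List (List Int) :=
  if steps ≤ 0 ∨ ¬(nD = 3 ∨ nD = 4) then data
  else
    let offsets := pvOffsets nD
    (PySem.List.pyRange 0 steps 1).foldl (fun active _ => pvStep offsets active) data

-- ===== PRECONDITION & SPEC =====
-- Reference set-level semantics used ONLY to state Pre_solve (independent of both ports):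
-- the offsets, the neighbour count, the life rule and one generation, as plain Finset
-- operations.
def pvOffL (n : Int) : List (List Int) :=
  ((List.replicate n.toNat ([-1, 0, 1] : List Int)).foldr
    (fun choices acc => choices.flatMap fun d => acc.map fun v => d :: v) [[]]).filter
    (fun v => v.any fun t => decide (t ≠ 0))

def pvLifeCnt (n : Int) (s : Finset (List Int)) (p : List Int) : Nat :=
  ((pvOffL n).filter fun o => List.zipWith (fun c d => c + d) p o ∈ s).length

def pvLifeRule (n : Int) (s : Finset (List Int)) (p : List Int) : Bool :=
  if p ∈ s then decide (pvLifeCnt n s p = 2 ∨ pvLifeCnt n s p = 3)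
  else decide (pvLifeCnt n s p = 3)

def pvLifeStep (n : Int) (s : Finset (List Int)) : Finset (List Int) :=
  (s ∪ s.biUnion fun c =>
      ((pvOffL n).map fun o => List.zipWith (fun c d => c + d) c o).toFinset).filter
    fun p => pvLifeRule n s p = true

def pvGens (n : Int) (data : List (List Int)) (k : Nat) : Finset (List Int) :=
  (pvLifeStep n)^[k] data.toFinset

-- data encodes a Python SET of int tuples, hence distinct elements (Nodup).
-- In the stepping case Pre_solve restricts to cells with exactly nD coordinates (the
-- automaton's natural domain: a shorter tuple raises IndexError in A; on longer tuples A
-- still returns a value — see the cites) and requires every generation A scans — the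
-- first `steps` generations of the life rule — to be nonempty: on an empty one A's
-- min() over an empty sequence raises ValueError (B just returns the empty set).
def Pre_solve (data : List (List Int)) (steps : Int) (nD : Int) : Prop :=
  data.Nodup ∧
  ((steps ≤ 0 ∨ (nD ≠ 3 ∧ nD ≠ 4)) ∨
   ((nD = 3 ∨ nD = 4) ∧ (∀ r ∈ data, (r.length : Int) = nD) ∧
    ∀ k < steps.toNat, pvGens nD data k ≠ ∅))

instance (data : List (List Int)) (steps : Int) (nD : Int) : Decidable (Pre_solve data steps nD) := by
  unfold Pre_solve; infer_instance

def pvWitness_solve : List (List Int) × Int × Int := ([[0, 0, 0], [0, 1, 0], [1, 0, 0], [1, 1, 0]], 1, 3)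

def Spec_solve (data : List (List Int)) (steps : Int) (nD : Int) (out : List (List Int)) : Prop :=
  out = solve_alt data steps nD
instance (data : List (List Int)) (steps : Int) (nD : Int) (out : List (List Int)) : Decidable (Spec_solve data steps nD out) := by
  unfold Spec_solve; infer_instance

-- ===== CLAIM (what is proved, stated in full; the proofs are below) =====
def Claim_equal_solve : Prop := ∀ (data : List (List Int)) (steps : Int) (nD : Int), Dom_solve data steps nD → Pre_solve data steps nD → Spec_solve data steps nD (solve data steps nD)

-- ===== LEMMAS AND PROOFS =====

-- adjacency: q + o = p for some nonzero offset o (proof-side vocabulary)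
def pvNAdj (n : Int) (q p : List Int) : Bool := decide (∃ o ∈ pvOffsets n, pvVadd q o = p)
def pvCnt (n : Int) (data : List (List Int)) (p : List Int) : Int :=
  (data.countP fun q => pvNAdj n q p : Nat)
-- the life rule exactly as A's branch structure decides it
def pvRule (n : Int) (data : List (List Int)) (p : List Int) : Bool :=
  if decide (p ∈ data) then decide (pvCnt n data p = 2 ∨ pvCnt n data p = 3)
  else decide (pvCnt n data p = 3)

def pvKeysL (n : Int) (data : List (List Int)) : List (List Int) :=
  data.flatMap fun c => (pvOffsets n).map (pvVadd c)


-- ---- generic helpers ----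

lemma pvMapM_eq_some {α β : Type} (f : α → Option β) (g : α → β) :
    ∀ (l : List α), (∀ x ∈ l, f x = some (g x)) → l.mapM f = some (l.map g) := by
  intro l h
  induction l with
  | nil => rfl
  | cons a t ih =>
    rw [List.mapM_cons, h a (by simp), ih (fun x hx => h x (by simp [hx]))]
    rfl

lemma pvFoldl_add_filter {α : Type} [BEq α] [LawfulBEq α] (p : α → Bool) :
    ∀ (xs : List α) (acc : List α), xs.Nodup → (∀ x ∈ xs, x ∉ acc) →
      xs.foldl (fun a x => if p x then PySem.Set.add a x else a) acc = acc ++ xs.filter p := by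
  intro xs
  induction xs with
  | nil => simp
  | cons a t ih =>
    intro acc hnd hdis
    simp only [List.foldl_cons, List.filter_cons]
    by_cases hp : p a
    · rw [if_pos hp, if_pos hp, PySem.Set.add_of_not_mem (hdis a (by simp)),
        ih (acc ++ [a]) hnd.of_cons ?_]
      · simp
      · intro x hx
        simp only [List.mem_append, List.mem_singleton]
        rintro (h | rfl)
        · exact hdis x (by simp [hx]) h
        · exact (List.nodup_cons.mp hnd).1 hx
    · rw [if_neg (by simp [hp]), if_neg (by simp [hp]),
        ih acc hnd.of_cons (fun x hx => hdis x (by simp [hx]))]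

lemma pvCountP_unique {α : Type} (q : α → Bool) :
    ∀ (l : List α), l.Nodup → (∀ a ∈ l, ∀ b ∈ l, q a → q b → a = b) →
      l.countP q = if l.any q then 1 else 0 := by
  intro l
  induction l with
  | nil => simp
  | cons a t ih =>
    intro hnd huniq
    by_cases hq : q a
    · have ht : t.countP q = 0 := by
        rw [List.countP_eq_zero]
        intro b hb hqb
        exact absurd (huniq a (by simp) b (by simp [hb]) hq hqb) (by
          rintro rfl; exact (List.nodup_cons.mp hnd).1 hb)
      simp [hq, ht]
    · have := ih hnd.of_cons (fun x hx y hy => huniq x (by simp [hx]) y (by simp [hy]))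
      simp [hq, this]

lemma pvFilter_mem_comm (xs ys : List (List Int))
    (hx : xs.Nodup) (hy : ys.Nodup) :
    (xs.filter fun a => decide (a ∈ ys)).length = (ys.filter fun a => decide (a ∈ xs)).length := by
  rw [← List.toFinset_card_of_nodup (hx.filter _), ← List.toFinset_card_of_nodup (hy.filter _)]
  congr 1
  apply Finset.ext
  intro a
  simp [and_comm]

lemma pvFoldl_ignore {α β γ : Type} (f : γ → γ) :
    ∀ (l1 : List α) (l2 : List β), l1.length = l2.length → ∀ (init : γ),
      l1.foldl (fun st _ => f st) init = l2.foldl (fun st _ => f st) init := by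
  intro l1
  induction l1 with
  | nil =>
    intro l2 h init
    cases l2 with
    | nil => rfl
    | cons b t => simp at h
  | cons a t ih =>
    intro l2 h init
    cases l2 with
    | nil => simp at h
    | cons b s =>
      simp only [List.length_cons, Nat.add_right_cancel_iff] at h
      simp only [List.foldl_cons]
      exact ih s h (f init)

-- ---- vadd ----

lemma pvVadd_inj : ∀ (c o1 o2 : List Int), o1.length = o2.length → o2.length ≤ c.length →
    pvVadd c o1 = pvVadd c o2 → o1 = o2 := by
  intro c
  induction c with
  | nil =>
    intro o1 o2 h1 h2 _
    simp only [List.length_nil, Nat.le_zero, List.length_eq_zero_iff] at h2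
    subst h2
    simp only [List.length_nil] at h1
    exact List.length_eq_zero_iff.mp h1
  | cons a t ih =>
    intro o1 o2 h1 h2 heq
    cases o1 with
    | nil => cases o2 with
      | nil => rfl
      | cons b s => simp at h1
    | cons b s =>
      cases o2 with
      | nil => simp at h1
      | cons b' s' =>
        simp only [pvVadd, List.zipWith_cons_cons, List.cons.injEq] at heq
        have hb : b = b' := by omega
        simp only [List.length_cons, Nat.add_le_add_iff_right] at h1 h2
        rw [hb, ih s s' (by omega) h2 heq.2]

lemma pvVadd_cancel : ∀ (q o : List Int), q.length = o.length →
    pvVadd (pvVadd q o) (o.map fun t => -t) = q := by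
  intro q
  induction q with
  | nil => intro o _; simp [pvVadd]
  | cons a t ih =>
    intro o h
    cases o with
    | nil => simp at h
    | cons b s =>
      simp only [List.length_cons, Nat.add_right_cancel_iff] at h
      simp only [pvVadd, List.zipWith_cons_cons, List.map_cons, List.cons.injEq] at *
      exact ⟨by ring, ih s h⟩

-- ---- concrete offset facts ----

lemma pvOffsets3_len : ∀ o ∈ pvOffsets 3, o.length = 3 := by decide
lemma pvOffsets4_len : ∀ o ∈ pvOffsets 4, o.length = 4 := by decide
lemma pvOffsets3_nodup : (pvOffsets 3).Nodup := by decide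
lemma pvOffsets4_nodup : (pvOffsets 4).Nodup := by decide
lemma pvOffsets3_neg : ∀ o ∈ pvOffsets 3, (o.map fun t => -t) ∈ pvOffsets 3 := by decide
lemma pvOffsets4_neg : ∀ o ∈ pvOffsets 4, (o.map fun t => -t) ∈ pvOffsets 4 := by decide
lemma pvOffsets3_bounds : ∀ o ∈ pvOffsets 3, ∀ t ∈ o, -1 ≤ t ∧ t ≤ 1 := by decide
lemma pvOffsets4_bounds : ∀ o ∈ pvOffsets 4, ∀ t ∈ o, -1 ≤ t ∧ t ≤ 1 := by decide
lemma pvOffL_eq3 : pvOffL 3 = pvOffsets 3 := by decide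
lemma pvOffL_eq4 : pvOffL 4 = pvOffsets 4 := by decide

lemma pvOffL_eq (n : Int) (hn : n = 3 ∨ n = 4) : pvOffL n = pvOffsets n := by
  rcases hn with rfl | rfl
  exacts [pvOffL_eq3, pvOffL_eq4]

lemma pvOffsets_len (n : Int) (hn : n = 3 ∨ n = 4) : ∀ o ∈ pvOffsets n, (o.length : Int) = n := by
  rcases hn with rfl | rfl
  · intro o ho; rw [pvOffsets3_len o ho]; rfl
  · intro o ho; rw [pvOffsets4_len o ho]; rfl

lemma pvOffsets_nodup (n : Int) (hn : n = 3 ∨ n = 4) : (pvOffsets n).Nodup := by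
  rcases hn with rfl | rfl
  exacts [pvOffsets3_nodup, pvOffsets4_nodup]

lemma pvOffsets_neg (n : Int) (hn : n = 3 ∨ n = 4) :
    ∀ o ∈ pvOffsets n, (o.map fun t => -t) ∈ pvOffsets n := by
  rcases hn with rfl | rfl
  exacts [pvOffsets3_neg, pvOffsets4_neg]

-- ---- adjacency symmetry ----

lemma pvNAdj_symm_aux (n : Int) (hn : n = 3 ∨ n = 4) (q p : List Int)
    (hq : (q.length : Int) = n) : pvNAdj n q p = true → pvNAdj n p q = true := by
  simp only [pvNAdj, decide_eq_true_eq]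
  rintro ⟨o, ho, rfl⟩
  refine ⟨o.map fun t => -t, pvOffsets_neg n hn o ho, ?_⟩
  exact pvVadd_cancel q o (by have := pvOffsets_len n hn o ho; omega)

lemma pvNAdj_symm (n : Int) (hn : n = 3 ∨ n = 4) (q p : List Int)
    (hq : (q.length : Int) = n) (hp : (p.length : Int) = n) : pvNAdj n q p = pvNAdj n p q := by
  by_cases h1 : pvNAdj n q p = true
  · rw [h1, (pvNAdj_symm_aux n hn q p hq h1).symm]
  · by_cases h2 : pvNAdj n p q = true
    · exact absurd (pvNAdj_symm_aux n hn p q hp h2) h1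
    · rw [Bool.not_eq_true] at h1 h2; rw [h1, h2]

-- ---- around = offsets.map (vadd p) ----

lemma pvRange113 : PySem.List.pyRange (-1) 2 1 = [-1, 0, 1] := by decide

lemma pvAround3d_eq (x y z : Int) : pvAround3d x y z = (pvOffsets 3).map (pvVadd [x, y, z]) := by
  have h : pvOffsets 3 = [[-1, -1, -1], [-1, -1, 0], [-1, -1, 1], [-1, 0, -1], [-1, 0, 0],
    [-1, 0, 1], [-1, 1, -1], [-1, 1, 0], [-1, 1, 1], [0, -1, -1], [0, -1, 0], [0, -1, 1],
    [0, 0, -1], [0, 0, 1], [0, 1, -1], [0, 1, 0], [0, 1, 1], [1, -1, -1], [1, -1, 0],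
    [1, -1, 1], [1, 0, -1], [1, 0, 0], [1, 0, 1], [1, 1, -1], [1, 1, 0], [1, 1, 1]] := by decide
  rw [h]
  simp only [pvAround3d, pvRange113]
  norm_num [pvVadd, List.flatMap_cons, List.filterMap_cons, Int.add_comm]

lemma pvAround4d_eq (x y z w : Int) : pvAround4d x y z w = (pvOffsets 4).map (pvVadd [x, y, z, w]) := by
  have h : pvOffsets 4 = [[-1, -1, -1, -1], [-1, -1, -1, 0], [-1, -1, -1, 1], [-1, -1, 0, -1], [-1, -1, 0, 0], [-1, -1, 0, 1], [-1, -1, 1, -1], [-1, -1, 1, 0], [-1, -1, 1, 1], [-1, 0, -1, -1], [-1, 0, -1, 0], [-1, 0, -1, 1], [-1, 0, 0, -1], [-1, 0, 0, 0], [-1, 0, 0, 1], [-1, 0, 1, -1], [-1, 0, 1, 0], [-1, 0, 1, 1], [-1, 1, -1, -1], [-1, 1, -1, 0], [-1, 1, -1, 1], [-1, 1, 0, -1], [-1, 1, 0, 0], [-1, 1, 0, 1], [-1, 1, 1, -1], [-1, 1, 1, 0], [-1, 1, 1, 1], [0, -1, -1, -1], [0, -1, -1, 0], [0, -1, -1,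 1], [0, -1, 0, -1], [0, -1, 0, 0], [0, -1, 0, 1], [0, -1, 1, -1], [0, -1, 1, 0], [0, -1, 1, 1], [0, 0, -1, -1], [0, 0, -1, 0], [0, 0, -1, 1], [0, 0, 0, -1], [0, 0, 0, 1], [0, 0, 1, -1], [0, 0, 1, 0], [0, 0, 1, 1], [0, 1, -1, -1], [0, 1, -1, 0], [0, 1, -1, 1], [0, 1, 0, -1], [0, 1, 0, 0], [0, 1, 0, 1], [0, 1, 1, -1], [0, 1, 1, 0], [0, 1, 1, 1], [1, -1, -1, -1], [1, -1, -1, 0], [1, -1, -1, 1], [1, -1, 0, -1], [1, -1, 0, 0], [1, -1, 0, 1], [1, -1, 1, -1], [1, -1, 1, 0], [1, -1, 1, 1], [1, 0, -1, -1], [1, 0, -1, 0], [1, 0, -1, 1], [1, 0, 0, -1], [1, 0, 0, 0], [1, 0, 0, 1], [1, 0, 1, -1], [1, 0, 1, 0], [1, 0, 1, 1], [1, 1, -1, -1], [1, 1, -1, 0], [1, 1, -1, 1], [1, 1, 0, -1], [1, 1, 0, 0], [1, 1, 0, 1], [1, 1, 1, -1], [1, 1, 1, 0], [1, 1, 1,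 1]] := by decide
  rw [h]
  simp only [pvAround4d, pvRange113]
  norm_num [pvVadd, List.flatMap_cons, List.filterMap_cons, Int.add_comm]

-- ---- the counts agree ----

lemma pvCntCore (n : Int) (hn : n = 3 ∨ n = 4) (data : List (List Int)) (hnd : data.Nodup)
    (hlen : ∀ r ∈ data, (r.length : Int) = n) (p : List Int) (hp : (p.length : Int) = n) :
    ((pvOffsets n).countP (fun o => decide (pvVadd p o ∈ data)) : Int) = pvCnt n data p := by
  have hoffnd := pvOffsets_nodup n hn
  have haround_nd : ((pvOffsets n).map (pvVadd p)).Nodup := by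
    refine List.Nodup.map_on ?_ hoffnd
    intro o1 h1 o2 h2 heq
    exact pvVadd_inj p o1 o2
      (by have e1 := pvOffsets_len n hn o1 h1; have e2 := pvOffsets_len n hn o2 h2; omega)
      (by have e2 := pvOffsets_len n hn o2 h2; omega) heq
  calc ((pvOffsets n).countP (fun o => decide (pvVadd p o ∈ data)) : Int)
      = ((((pvOffsets n).map (pvVadd p)).filter (fun q => decide (q ∈ data))).length : Int) := by
        rw [List.filter_map, List.length_map, List.countP_eq_length_filter]
        simp only [Function.comp_def]
    _ = ((data.filter (fun q => decide (q ∈ (pvOffsets n).map (pvVadd p)))).length : Int) := by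
        rw [pvFilter_mem_comm _ data haround_nd hnd]
    _ = pvCnt n data p := by
        have hpt : ∀ q ∈ data, (decide (q ∈ (pvOffsets n).map (pvVadd p)) : Bool)
            = pvNAdj n q p := by
          intro q hq
          have e1 : decide (q ∈ (pvOffsets n).map (pvVadd p)) = pvNAdj n p q := by
            rw [Bool.eq_iff_iff]
            simp only [pvNAdj, decide_eq_true_eq, List.mem_map]
          rw [e1, pvNAdj_symm n hn p q hp (hlen q hq)]
        rw [pvCnt, List.countP_eq_length_filter, List.filter_congr hpt]

lemma pvCount3d_eq (data : List (List Int)) (hnd : data.Nodup)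
    (hlen : ∀ r ∈ data, (r.length : Int) = 3) (x y z : Int) :
    pvCount3d data x y z = pvCnt 3 data [x, y, z] := by
  have hbody : ∀ (r : Int) (pos : List Int),
      (if pos ∈ data then r + 1 else r) = (if decide (pos ∈ data) = true then r + 1 else r) := by
    intro r pos; simp
  rw [pvCount3d]
  simp only [hbody]
  rw [PySem.List.foldl_count_if (fun pos => decide (pos ∈ data)), pvAround3d_eq,
    List.countP_map, zero_add, ← pvCntCore 3 (Or.inl rfl) data hnd hlen [x, y, z] (by rfl)]
  rfl

lemma pvCount4d_eq (data : List (List Int)) (hnd : data.Nodup)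
    (hlen : ∀ r ∈ data, (r.length : Int) = 4) (x y z w : Int) :
    pvCount4d data x y z w = pvCnt 4 data [x, y, z, w] := by
  have hbody : ∀ (r : Int) (pos : List Int),
      (if pos ∈ data then r + 1 else r) = (if decide (pos ∈ data) = true then r + 1 else r) := by
    intro r pos; simp
  rw [pvCount4d]
  simp only [hbody]
  rw [PySem.List.foldl_count_if (fun pos => decide (pos ∈ data)), pvAround4d_eq,
    List.countP_map, zero_add, ← pvCntCore 4 (Or.inr rfl) data hnd hlen [x, y, z, w] (by rfl)]
  rfl

lemma pvKeysL_count (n : Int) (hn : n = 3 ∨ n = 4) (data : List (List Int))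
    (hlen : ∀ r ∈ data, (r.length : Int) = n) (p : List Int) :
    ((pvKeysL n data).count p : Int) = pvCnt n data p := by
  revert hlen
  induction data with
  | nil => intro _; simp [pvKeysL, pvCnt]
  | cons c t ih =>
    intro hlen
    have hct : (((pvOffsets n).map (pvVadd c)).count p : Int) = if pvNAdj n c p then 1 else 0 := by
      rw [List.count_eq_countP, List.countP_map]
      have h1 : ((pvOffsets n).countP ((fun x => x == p) ∘ pvVadd c))
          = if (pvOffsets n).any ((fun x => x == p) ∘ pvVadd c) then 1 else 0 := by
        apply pvCountP_unique _ _ (pvOffsets_nodup n hn)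
        intro o1 h1 o2 h2 hq1 hq2
        simp only [Function.comp, beq_iff_eq] at hq1 hq2
        exact pvVadd_inj c o1 o2
          (by have := pvOffsets_len n hn o1 h1; have := pvOffsets_len n hn o2 h2; omega)
          (by have := pvOffsets_len n hn o2 h2; have := hlen c (by simp); omega)
          (hq1.trans hq2.symm)
      have h2 : (pvOffsets n).any ((fun x => x == p) ∘ pvVadd c) = pvNAdj n c p := by
        rw [Bool.eq_iff_iff]
        simp only [pvNAdj, List.any_eq_true, decide_eq_true_eq, Function.comp_apply, beq_iff_eq]
      rw [h1, h2]
      split <;> rfl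
    have iht := ih (fun r hr => hlen r (by simp [hr]))
    have expand : pvKeysL n (c :: t) = ((pvOffsets n).map (pvVadd c)) ++ pvKeysL n t := by
      simp [pvKeysL]
    rw [expand, List.count_append, pvCnt, List.countP_cons]
    push_cast
    rw [hct, iht, pvCnt]
    by_cases h : pvNAdj n c p
    · simp [h]; ring
    · simp [h]

-- ---- box lists ----

def pvBox3 (t1 t2 t3 : Int × Int) : List (List Int) :=
  (PySem.List.pyRange t1.1 t1.2 1).flatMap fun x =>
    (PySem.List.pyRange t2.1 t2.2 1).flatMap fun y =>
      (PySem.List.pyRange t3.1 t3.2 1).map fun z => [x, y, z]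

def pvBox4 (t1 t2 t3 t4 : Int × Int) : List (List Int) :=
  (PySem.List.pyRange t1.1 t1.2 1).flatMap fun x =>
    (PySem.List.pyRange t2.1 t2.2 1).flatMap fun y =>
      (PySem.List.pyRange t3.1 t3.2 1).flatMap fun z =>
        (PySem.List.pyRange t4.1 t4.2 1).map fun w => [x, y, z, w]

lemma pvMem_box3 (t1 t2 t3 : Int × Int) (p : List Int) :
    p ∈ pvBox3 t1 t2 t3 ↔ ∃ x y z, (t1.1 ≤ x ∧ x < t1.2) ∧ (t2.1 ≤ y ∧ y < t2.2) ∧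
      (t3.1 ≤ z ∧ z < t3.2) ∧ p = [x, y, z] := by
  simp only [pvBox3, List.mem_flatMap, List.mem_map, PySem.List.mem_pyRange_one]
  constructor
  · rintro ⟨x, hx, y, hy, z, hz, rfl⟩; exact ⟨x, y, z, hx, hy, hz, rfl⟩
  · rintro ⟨x, y, z, hx, hy, hz, rfl⟩; exact ⟨x, hx, y, hy, z, hz, rfl⟩

lemma pvMem_box4 (t1 t2 t3 t4 : Int × Int) (p : List Int) :
    p ∈ pvBox4 t1 t2 t3 t4 ↔ ∃ x y z w, (t1.1 ≤ x ∧ x < t1.2) ∧ (t2.1 ≤ y ∧ y < t2.2) ∧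
      (t3.1 ≤ z ∧ z < t3.2) ∧ (t4.1 ≤ w ∧ w < t4.2) ∧ p = [x, y, z, w] := by
  simp only [pvBox4, List.mem_flatMap, List.mem_map, PySem.List.mem_pyRange_one]
  constructor
  · rintro ⟨x, hx, y, hy, z, hz, w, hw, rfl⟩; exact ⟨x, y, z, w, hx, hy, hz, hw, rfl⟩
  · rintro ⟨x, y, z, w, hx, hy, hz, hw, rfl⟩; exact ⟨x, hx, y, hy, z, hz, w, hw, rfl⟩

lemma pvLt_cons (a b : Int) (l m : List Int) :
    a < b ∨ (a = b ∧ l < m) → ((a :: l : List Int) < b :: m) :=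
  List.cons_lex_cons_iff.mpr

lemma pvBox3_pairwise (t1 t2 t3 : Int × Int) :
    (pvBox3 t1 t2 t3).Pairwise (fun a b : List Int => a < b) := by
  unfold pvBox3
  rw [List.pairwise_flatMap]
  constructor
  · intro x _
    rw [List.pairwise_flatMap]
    constructor
    · intro y _
      rw [List.pairwise_map]
      exact (PySem.List.pairwise_lt_pyRange_one _ _).imp
        (fun h => pvLt_cons _ _ _ _ (Or.inr ⟨rfl, pvLt_cons _ _ _ _ (Or.inr ⟨rfl, pvLt_cons _ _ _ _ (Or.inl h)⟩)⟩))
    · exact (PySem.List.pairwise_lt_pyRange_one _ _).imp (by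
        rintro y1 y2 h p hp q hq
        simp only [List.mem_map] at hp hq
        obtain ⟨z1, _, rfl⟩ := hp
        obtain ⟨z2, _, rfl⟩ := hq
        exact pvLt_cons _ _ _ _ (Or.inr ⟨rfl, pvLt_cons _ _ _ _ (Or.inl h)⟩))
  · exact (PySem.List.pairwise_lt_pyRange_one _ _).imp (by
      rintro x1 x2 h p hp q hq
      simp only [List.mem_flatMap, List.mem_map] at hp hq
      obtain ⟨y1, _, z1, _, rfl⟩ := hp
      obtain ⟨y2, _, z2, _, rfl⟩ := hq
      exact pvLt_cons _ _ _ _ (Or.inl h))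

lemma pvBox4_pairwise (t1 t2 t3 t4 : Int × Int) :
    (pvBox4 t1 t2 t3 t4).Pairwise (fun a b : List Int => a < b) := by
  unfold pvBox4
  rw [List.pairwise_flatMap]
  constructor
  · intro x _
    rw [List.pairwise_flatMap]
    constructor
    · intro y _
      rw [List.pairwise_flatMap]
      constructor
      · intro z _
        rw [List.pairwise_map]
        exact (PySem.List.pairwise_lt_pyRange_one _ _).imp
          (fun h => pvLt_cons _ _ _ _ (Or.inr ⟨rfl, pvLt_cons _ _ _ _ (Or.inr ⟨rfl,
            pvLt_cons _ _ _ _ (Or.inr ⟨rfl, pvLt_cons _ _ _ _ (Or.inl h)⟩)⟩)⟩))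
      · exact (PySem.List.pairwise_lt_pyRange_one _ _).imp (by
          rintro z1 z2 h p hp q hq
          simp only [List.mem_map] at hp hq
          obtain ⟨w1, _, rfl⟩ := hp
          obtain ⟨w2, _, rfl⟩ := hq
          exact pvLt_cons _ _ _ _ (Or.inr ⟨rfl, pvLt_cons _ _ _ _ (Or.inr ⟨rfl, pvLt_cons _ _ _ _ (Or.inl h)⟩)⟩))
    · exact (PySem.List.pairwise_lt_pyRange_one _ _).imp (by
        rintro y1 y2 h p hp q hq
        simp only [List.mem_flatMap, List.mem_map] at hp hq
        obtain ⟨z1, _, w1, _, rfl⟩ := hp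
        obtain ⟨z2, _, w2, _, rfl⟩ := hq
        exact pvLt_cons _ _ _ _ (Or.inr ⟨rfl, pvLt_cons _ _ _ _ (Or.inl h)⟩))
  · exact (PySem.List.pairwise_lt_pyRange_one _ _).imp (by
      rintro x1 x2 h p hp q hq
      simp only [List.mem_flatMap, List.mem_map] at hp hq
      obtain ⟨y1, _, z1, _, w1, _, rfl⟩ := hp
      obtain ⟨y2, _, z2, _, w2, _, rfl⟩ := hq
      exact pvLt_cons _ _ _ _ (Or.inl h))

lemma pvBox3_nodup (t1 t2 t3 : Int × Int) : (pvBox3 t1 t2 t3).Nodup :=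
  (pvBox3_pairwise t1 t2 t3).imp ne_of_lt

lemma pvBox4_nodup (t1 t2 t3 t4 : Int × Int) : (pvBox4 t1 t2 t3 t4).Nodup :=
  (pvBox4_pairwise t1 t2 t3 t4).imp ne_of_lt

-- ---- shapes ----

lemma pvShape3 (l : List Int) (h : l.length = 3) : ∃ a b c, l = [a, b, c] := by
  rcases l with _ | ⟨a, _ | ⟨b, _ | ⟨c, _ | ⟨d, t⟩⟩⟩⟩ <;> simp_all

lemma pvShape4 (l : List Int) (h : l.length = 4) : ∃ a b c d, l = [a, b, c, d] := by
  rcases l with _ | ⟨a, _ | ⟨b, _ | ⟨c, _ | ⟨d, _ | ⟨e, t⟩⟩⟩⟩⟩ <;> simp_all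

-- ---- the bounding box computed by _transform_nd ----

lemma pvGet_some (r : List Int) (k : Nat) (hk : k < r.length) :
    PySem.List.pyGet? r (k : Int) = some (r.getD k 0) := by
  rw [PySem.List.pyGet?_natCast, List.getElem?_eq_getElem hk, List.getD_eq_getElem r 0 hk]

lemma pvColumn_spec (data : List (List Int)) (hne : data ≠ []) (d : Int) (g : List Int → Int)
    (hget : ∀ r ∈ data, PySem.List.pyGet? r d = some (g r)) (tr : List (Int × Int)) :
    ∃ lo hi : Int,
      ((data.mapM fun x => PySem.List.pyGet? x d).bind fun vals =>
        (PySem.List.min? vals fun v => v).bind fun lo =>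
          (PySem.List.max? vals fun v => v).map fun hi => tr ++ [(lo - 1, hi + 2)])
        = some (tr ++ [(lo - 1, hi + 2)]) ∧
      ∀ r ∈ data, lo ≤ g r ∧ g r ≤ hi := by
  have hmm := pvMapM_eq_some (fun x => PySem.List.pyGet? x d) g data hget
  have hvne : data.map g ≠ [] := by simpa using hne
  obtain ⟨lo, hlo⟩ : ∃ lo, PySem.List.min? (data.map g) (fun v => v) = some lo := by
    cases h : PySem.List.min? (data.map g) (fun v => v) with
    | none => exact absurd ((PySem.List.min?_eq_none_iff _ _).mp h) hvne
    | some m => exact ⟨m, rfl⟩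
  obtain ⟨hi, hhi⟩ : ∃ hi, PySem.List.max? (data.map g) (fun v => v) = some hi := by
    cases h : PySem.List.max? (data.map g) (fun v => v) with
    | none => exact absurd ((PySem.List.max?_eq_none_iff _ _).mp h) hvne
    | some m => exact ⟨m, rfl⟩
  refine ⟨lo, hi, ?_, ?_⟩
  · rw [hmm, Option.bind_some, hlo, Option.bind_some, hhi, Option.map_some]
  · intro r hr
    exact ⟨PySem.List.min?_isMin hlo (g r) (List.mem_map_of_mem hr),
           PySem.List.max?_isMax hhi (g r) (List.mem_map_of_mem hr)⟩

lemma pvTransform3 (data : List (List Int)) (hne : data ≠ [])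
    (hlen : ∀ r ∈ data, (r.length : Int) = 3) :
    ∃ lo0 hi0 lo1 hi1 lo2 hi2 : Int,
      pvTransformNd data 3 = some [(lo0 - 1, hi0 + 2), (lo1 - 1, hi1 + 2), (lo2 - 1, hi2 + 2)] ∧
      ∀ r ∈ data, (lo0 ≤ r.getD 0 0 ∧ r.getD 0 0 ≤ hi0) ∧ (lo1 ≤ r.getD 1 0 ∧ r.getD 1 0 ≤ hi1) ∧
        (lo2 ≤ r.getD 2 0 ∧ r.getD 2 0 ≤ hi2) := by
  have hget : ∀ k : Nat, k < 3 → ∀ r ∈ data, PySem.List.pyGet? r (k : Int) = some (r.getD k 0) :=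
    fun k hk r hr => pvGet_some r k (by have := hlen r hr; omega)
  unfold pvTransformNd
  rw [show PySem.List.pyRange 0 3 1 = [0, 1, 2] from by decide]
  simp only [List.foldl_cons, List.foldl_nil]
  obtain ⟨lo0, hi0, he0, hb0⟩ := pvColumn_spec data hne 0 (fun r => r.getD 0 0)
    (by simpa using hget 0 (by omega)) []
  rw [Option.bind_some, he0]
  simp only [List.nil_append]
  obtain ⟨lo1, hi1, he1, hb1⟩ := pvColumn_spec data hne 1 (fun r => r.getD 1 0)
    (by simpa using hget 1 (by omega)) [(lo0 - 1, hi0 + 2)]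
  rw [Option.bind_some, he1]
  simp only [List.nil_append, List.cons_append]
  obtain ⟨lo2, hi2, he2, hb2⟩ := pvColumn_spec data hne 2 (fun r => r.getD 2 0)
    (by simpa using hget 2 (by omega)) [(lo0 - 1, hi0 + 2), (lo1 - 1, hi1 + 2)]
  rw [Option.bind_some, he2]
  simp only [List.nil_append, List.cons_append]
  exact ⟨lo0, hi0, lo1, hi1, lo2, hi2, rfl,
    fun r hr => ⟨hb0 r hr, hb1 r hr, hb2 r hr⟩⟩

lemma pvTransform4 (data : List (List Int)) (hne : data ≠ [])
    (hlen : ∀ r ∈ data, (r.length : Int) = 4) :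
    ∃ lo0 hi0 lo1 hi1 lo2 hi2 lo3 hi3 : Int,
      pvTransformNd data 4 = some [(lo0 - 1, hi0 + 2), (lo1 - 1, hi1 + 2), (lo2 - 1, hi2 + 2),
        (lo3 - 1, hi3 + 2)] ∧
      ∀ r ∈ data, (lo0 ≤ r.getD 0 0 ∧ r.getD 0 0 ≤ hi0) ∧ (lo1 ≤ r.getD 1 0 ∧ r.getD 1 0 ≤ hi1) ∧
        (lo2 ≤ r.getD 2 0 ∧ r.getD 2 0 ≤ hi2) ∧ (lo3 ≤ r.getD 3 0 ∧ r.getD 3 0 ≤ hi3) := by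
  have hget : ∀ k : Nat, k < 4 → ∀ r ∈ data, PySem.List.pyGet? r (k : Int) = some (r.getD k 0) :=
    fun k hk r hr => pvGet_some r k (by have := hlen r hr; omega)
  unfold pvTransformNd
  rw [show PySem.List.pyRange 0 4 1 = [0, 1, 2, 3] from by decide]
  simp only [List.foldl_cons, List.foldl_nil]
  obtain ⟨lo0, hi0, he0, hb0⟩ := pvColumn_spec data hne 0 (fun r => r.getD 0 0)
    (by simpa using hget 0 (by omega)) []
  rw [Option.bind_some, he0]
  simp only [List.nil_append]
  obtain ⟨lo1, hi1, he1, hb1⟩ := pvColumn_spec data hne 1 (fun r => r.getD 1 0)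
    (by simpa using hget 1 (by omega)) [(lo0 - 1, hi0 + 2)]
  rw [Option.bind_some, he1]
  simp only [List.nil_append, List.cons_append]
  obtain ⟨lo2, hi2, he2, hb2⟩ := pvColumn_spec data hne 2 (fun r => r.getD 2 0)
    (by simpa using hget 2 (by omega)) [(lo0 - 1, hi0 + 2), (lo1 - 1, hi1 + 2)]
  rw [Option.bind_some, he2]
  simp only [List.nil_append, List.cons_append]
  obtain ⟨lo3, hi3, he3, hb3⟩ := pvColumn_spec data hne 3 (fun r => r.getD 3 0)
    (by simpa using hget 3 (by omega)) [(lo0 - 1, hi0 + 2), (lo1 - 1, hi1 + 2), (lo2 - 1, hi2 + 2)]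
  rw [Option.bind_some, he3]
  simp only [List.nil_append, List.cons_append]
  exact ⟨lo0, hi0, lo1, hi1, lo2, hi2, lo3, hi3, rfl,
    fun r hr => ⟨hb0 r hr, hb1 r hr, hb2 r hr, hb3 r hr⟩⟩

-- ---- A's box scan is a filter of the box list ----

lemma pvCalc3 (data : List (List Int)) (hnd : data.Nodup)
    (hlen : ∀ r ∈ data, (r.length : Int) = 3) (t1 t2 t3 : Int × Int)
    (ht : pvTransformNd data 3 = some [t1, t2, t3]) :
    pvCalculate3d data = some ((pvBox3 t1 t2 t3).filter (pvRule 3 data)) := by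
  rw [pvCalculate3d, ht, Option.bind_some]
  have hbody : ∀ (acc : PySem.Set (List Int)) (x y z : Int),
      (if [x, y, z] ∈ data then
        (if pvCount3d data x y z = 2 ∨ pvCount3d data x y z = 3 then PySem.Set.add acc [x, y, z] else acc)
      else
        (if pvCount3d data x y z = 3 then PySem.Set.add acc [x, y, z] else acc))
      = if pvRule 3 data [x, y, z] then PySem.Set.add acc [x, y, z] else acc := by
    intro acc x y z
    rw [pvRule, pvCount3d_eq data hnd hlen]
    by_cases hm : [x, y, z] ∈ data <;> simp [hm]
  simp only [hbody]
  rw [show ((pvBox3 t1 t2 t3).filter (pvRule 3 data) : List (List Int))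
      = (PySem.Set.empty : PySem.Set (List Int)) ++ (pvBox3 t1 t2 t3).filter (pvRule 3 data) from rfl]
  rw [← pvFoldl_add_filter (pvRule 3 data) (pvBox3 t1 t2 t3) PySem.Set.empty
    (pvBox3_nodup t1 t2 t3) (by intro x _ h; simp [PySem.Set.empty] at h)]
  simp only [pvBox3, List.foldl_flatMap, List.foldl_map]

lemma pvCalc4 (data : List (List Int)) (hnd : data.Nodup)
    (hlen : ∀ r ∈ data, (r.length : Int) = 4) (t1 t2 t3 t4 : Int × Int)
    (ht : pvTransformNd data 4 = some [t1, t2, t3, t4]) :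
    pvCalculate4d data = some ((pvBox4 t1 t2 t3 t4).filter (pvRule 4 data)) := by
  rw [pvCalculate4d, ht, Option.bind_some]
  have hbody : ∀ (acc : PySem.Set (List Int)) (x y z w : Int),
      (if [x, y, z, w] ∈ data then
        (if pvCount4d data x y z w = 2 ∨ pvCount4d data x y z w = 3 then PySem.Set.add acc [x, y, z, w] else acc)
      else
        (if pvCount4d data x y z w = 3 then PySem.Set.add acc [x, y, z, w] else acc))
      = if pvRule 4 data [x, y, z, w] then PySem.Set.add acc [x, y, z, w] else acc := by
    intro acc x y z w
    rw [pvRule, pvCount4d_eq data hnd hlen]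
    by_cases hm : [x, y, z, w] ∈ data <;> simp [hm]
  simp only [hbody]
  rw [show ((pvBox4 t1 t2 t3 t4).filter (pvRule 4 data) : List (List Int))
      = (PySem.Set.empty : PySem.Set (List Int)) ++ (pvBox4 t1 t2 t3 t4).filter (pvRule 4 data) from rfl]
  rw [← pvFoldl_add_filter (pvRule 4 data) (pvBox4 t1 t2 t3 t4) PySem.Set.empty
    (pvBox4_nodup t1 t2 t3 t4) (by intro x _ h; simp [PySem.Set.empty] at h)]
  simp only [pvBox4, List.foldl_flatMap, List.foldl_map]

-- ---- B's sparse step is the same filter of the same box list ----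

lemma pvStep_eq (n : Int) (hn : n = 3 ∨ n = 4) (data box : List (List Int)) (_hnd : data.Nodup)
    (hlen : ∀ r ∈ data, (r.length : Int) = n)
    (hbox : box.Pairwise (fun a b : List Int => a < b))
    (hsub : ∀ p ∈ pvKeysL n data, p ∈ box) :
    pvStep (pvOffsets n) data = box.filter (pvRule n data) := by
  have hboxnd : box.Nodup := hbox.imp ne_of_lt
  have hcounts : (data.foldl (fun d cell =>
        (pvOffsets n).foldl (fun d off => d.modify (pvVadd cell off) 0 (· + 1)) d)
        PySem.Dict.empty) = PySem.Dict.counter (pvKeysL n data) := by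
    rw [PySem.Dict.counter_eq_foldl, pvKeysL, List.foldl_flatMap]
    simp only [List.foldl_map]
  rw [pvStep]
  simp only [hcounts, PySem.Dict.keys_counter, PySem.Dict.getD_counter]
  have hsort : pvSortedKeys (PySem.Set.ofList (pvKeysL n data))
      = box.filter (fun p => decide (p ∈ pvKeysL n data)) := by
    unfold pvSortedKeys
    apply PySem.List.sorted_eq_of_perm_of_pairwise_lt
    · apply (List.perm_ext_iff_of_nodup (hboxnd.filter _) (PySem.Set.nodup_ofList _)).mpr
      intro p
      simp only [List.mem_filter, PySem.Set.mem_ofList, decide_eq_true_eq]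
      exact ⟨fun h => h.2, fun h => ⟨hsub p h, h⟩⟩
    · exact hbox.filter _
  rw [hsort, List.filter_filter]
  have hpred : ∀ p ∈ box,
      ((↑(List.count p (pvKeysL n data)) == (3 : Int)
          || (↑(List.count p (pvKeysL n data)) == (2 : Int) && decide (p ∈ data)))
        && decide (p ∈ pvKeysL n data))
      = pvRule n data p := by
    intro p _
    have hc := pvKeysL_count n hn data hlen p
    have hmemc : (decide (p ∈ pvKeysL n data) : Bool) = decide (0 < pvCnt n data p) := by
      rw [← hc]
      rcases h : List.count p (pvKeysL n data) with _ | m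
      · simp [List.count_eq_zero.mp h]
      · have hm : p ∈ pvKeysL n data := List.count_pos_iff.mp (by omega)
        simp [hm]
        try omega
    rw [hc, hmemc, pvRule, Bool.eq_iff_iff]
    by_cases hd : p ∈ data <;> simp [hd] <;> omega
  rw [List.filter_congr hpred]
  exact PySem.Set.ofList_eq_self_of_nodup _ (hboxnd.filter _)

-- ---- the port-side rule agrees with the set-level life rule ----

lemma pvCnt_pos_exists (n : Int) (data : List (List Int)) (p : List Int)
    (h : 0 < pvCnt n data p) : ∃ q ∈ data, ∃ o ∈ pvOffsets n, pvVadd q o = p := by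
  rw [pvCnt] at h
  have hcp : 0 < data.countP fun q => pvNAdj n q p := by exact_mod_cast h
  obtain ⟨q, hq, hadj⟩ := List.countP_pos_iff.mp hcp
  rw [pvNAdj, decide_eq_true_eq] at hadj
  exact ⟨q, hq, hadj⟩

lemma pvLifeCnt_eq (n : Int) (hn : n = 3 ∨ n = 4) (data : List (List Int)) (hnd : data.Nodup)
    (hlen : ∀ r ∈ data, (r.length : Int) = n) (p : List Int) (hp : (p.length : Int) = n) :
    (pvLifeCnt n data.toFinset p : Int) = pvCnt n data p := by
  rw [pvLifeCnt, pvOffL_eq n hn, ← List.countP_eq_length_filter,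
    ← pvCntCore n hn data hnd hlen p hp]
  congr 1
  apply List.countP_congr
  intro o _
  simp [pvVadd]

lemma pvLifeRule_eq (n : Int) (hn : n = 3 ∨ n = 4) (data : List (List Int)) (hnd : data.Nodup)
    (hlen : ∀ r ∈ data, (r.length : Int) = n) (p : List Int) (hp : (p.length : Int) = n) :
    pvLifeRule n data.toFinset p = pvRule n data p := by
  have hc := pvLifeCnt_eq n hn data hnd hlen p hp
  rw [pvLifeRule, pvRule]
  by_cases hd : p ∈ data
  · rw [if_pos (List.mem_toFinset.mpr hd), if_pos (by simpa using hd), decide_eq_decide]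
    omega
  · rw [if_neg (by simpa using hd), if_neg (by simpa using hd), decide_eq_decide]
    omega

lemma pvCand_len (n : Int) (hn : n = 3 ∨ n = 4) (data : List (List Int))
    (hlen : ∀ r ∈ data, (r.length : Int) = n) (p : List Int)
    (hc : p ∈ data.toFinset ∪ data.toFinset.biUnion fun c =>
      ((pvOffL n).map fun o => List.zipWith (fun c d => c + d) c o).toFinset) :
    (p.length : Int) = n := by
  rw [Finset.mem_union] at hc
  rcases hc with hc | hc
  · exact hlen p (List.mem_toFinset.mp hc)
  · rw [Finset.mem_biUnion] at hc
    obtain ⟨q, hq, hp⟩ := hc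
    rw [List.mem_toFinset, List.mem_map] at hp
    obtain ⟨o, ho, rfl⟩ := hp
    rw [pvOffL_eq n hn] at ho
    have h1 := hlen q (List.mem_toFinset.mp hq)
    have h2 := pvOffsets_len n hn o ho
    rw [List.length_zipWith]
    omega

lemma pvRule_mem_cand (n : Int) (hn : n = 3 ∨ n = 4) (data : List (List Int))
    (p : List Int) (hr : pvRule n data p = true) :
    p ∈ data.toFinset ∪ data.toFinset.biUnion fun c =>
      ((pvOffL n).map fun o => List.zipWith (fun c d => c + d) c o).toFinset := by
  rw [Finset.mem_union]
  by_cases hd : p ∈ data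
  · exact Or.inl (List.mem_toFinset.mpr hd)
  · rw [pvRule, if_neg (by simpa using hd), decide_eq_true_eq] at hr
    obtain ⟨q, hq, o, ho, rfl⟩ := pvCnt_pos_exists n data p (by omega)
    refine Or.inr (Finset.mem_biUnion.mpr ⟨q, List.mem_toFinset.mpr hq, ?_⟩)
    rw [List.mem_toFinset, List.mem_map]
    exact ⟨o, by rw [pvOffL_eq n hn]; exact ho, rfl⟩

lemma pvStepFinset (n : Int) (hn : n = 3 ∨ n = 4) (data : List (List Int)) (hnd : data.Nodup)
    (hlen : ∀ r ∈ data, (r.length : Int) = n) (box : List (List Int))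
    (hrulebox : ∀ p, pvRule n data p = true → p ∈ box)
    (hboxlen : ∀ p ∈ box, (p.length : Int) = n) :
    (box.filter (pvRule n data)).toFinset = pvLifeStep n data.toFinset := by
  ext p
  rw [List.mem_toFinset, List.mem_filter, pvLifeStep, Finset.mem_filter]
  constructor
  · rintro ⟨hbox, hr⟩
    have hp := hboxlen p hbox
    exact ⟨pvRule_mem_cand n hn data p hr,
      by rw [pvLifeRule_eq n hn data hnd hlen p hp]; exact hr⟩
  · rintro ⟨hc, hr⟩
    have hp := pvCand_len n hn data hlen p hc
    rw [pvLifeRule_eq n hn data hnd hlen p hp] at hr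
    exact ⟨hrulebox p hr, hr⟩

-- ---- one full A-step = one B-step = one life step (with the invariants carried) ----

lemma pvOneStep (n : Int) (hn : n = 3 ∨ n = 4) (data : List (List Int)) (hnd : data.Nodup)
    (hne : data ≠ []) (hlen : ∀ r ∈ data, (r.length : Int) = n) :
    ∃ out : List (List Int),
      (if n = 3 then pvCalculate3d data else if n = 4 then pvCalculate4d data else some data)
        = some out ∧
      out = pvStep (pvOffsets n) data ∧ out.Nodup ∧ (∀ r ∈ out, (r.length : Int) = n) ∧
      out.toFinset = pvLifeStep n data.toFinset := by
  rcases hn with rfl | rfl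
  · obtain ⟨lo0, hi0, lo1, hi1, lo2, hi2, ht, hb⟩ := pvTransform3 data hne hlen
    set t1 : Int × Int := (lo0 - 1, hi0 + 2)
    set t2 : Int × Int := (lo1 - 1, hi1 + 2)
    set t3 : Int × Int := (lo2 - 1, hi2 + 2)
    have hsubkeys : ∀ p ∈ pvKeysL 3 data, p ∈ pvBox3 t1 t2 t3 := by
      intro p hp
      rw [pvKeysL, List.mem_flatMap] at hp
      obtain ⟨c, hc, hp⟩ := hp
      rw [List.mem_map] at hp
      obtain ⟨o, ho, rfl⟩ := hp
      obtain ⟨a, b, c2, rfl⟩ := pvShape3 c (by have := hlen c hc; omega)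
      obtain ⟨u, v, w, rfl⟩ := pvShape3 o (pvOffsets3_len o ho)
      have hbnd := pvOffsets3_bounds _ ho
      have hu := hbnd u (by simp); have hv := hbnd v (by simp); have hw := hbnd w (by simp)
      have hb' := hb _ hc
      simp only [List.getD_cons_zero, List.getD_cons_succ] at hb'
      rw [pvMem_box3]
      refine ⟨a + u, b + v, c2 + w, ?_, ?_, ?_, by simp [pvVadd]⟩ <;> simp [t1, t2, t3] <;> omega
    have hsubdata : ∀ p ∈ data, p ∈ pvBox3 t1 t2 t3 := by
      intro p hp
      obtain ⟨a, b, c2, rfl⟩ := pvShape3 p (by have := hlen p hp; omega)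
      have hb' := hb _ hp
      simp only [List.getD_cons_zero, List.getD_cons_succ] at hb'
      rw [pvMem_box3]
      refine ⟨a, b, c2, ?_, ?_, ?_, rfl⟩ <;> simp [t1, t2, t3] <;> omega
    have hrulebox : ∀ p, pvRule 3 data p = true → p ∈ pvBox3 t1 t2 t3 := by
      intro p hr
      by_cases hd : p ∈ data
      · exact hsubdata p hd
      · rw [pvRule, if_neg (by simpa using hd), decide_eq_true_eq] at hr
        have hpos : 0 < pvCnt 3 data p := by omega
        have hcnt := pvKeysL_count 3 (Or.inl rfl) data hlen p
        have : p ∈ pvKeysL 3 data := List.count_pos_iff.mp (by omega)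
        exact hsubkeys p this
    have hboxlen : ∀ p ∈ pvBox3 t1 t2 t3, (p.length : Int) = 3 := by
      intro p hp
      obtain ⟨x, y, z, _, _, _, rfl⟩ := (pvMem_box3 t1 t2 t3 p).mp hp
      rfl
    refine ⟨(pvBox3 t1 t2 t3).filter (pvRule 3 data), ?_, ?_, ?_, ?_, ?_⟩
    · rw [if_pos rfl]
      exact pvCalc3 data hnd hlen t1 t2 t3 ht
    · exact (pvStep_eq 3 (Or.inl rfl) data _ hnd hlen (pvBox3_pairwise _ _ _) hsubkeys).symm
    · exact (pvBox3_nodup t1 t2 t3).filter _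
    · intro r hr; exact hboxlen r (List.mem_filter.mp hr).1
    · exact pvStepFinset 3 (Or.inl rfl) data hnd hlen _ hrulebox hboxlen
  · obtain ⟨lo0, hi0, lo1, hi1, lo2, hi2, lo3, hi3, ht, hb⟩ := pvTransform4 data hne hlen
    set t1 : Int × Int := (lo0 - 1, hi0 + 2)
    set t2 : Int × Int := (lo1 - 1, hi1 + 2)
    set t3 : Int × Int := (lo2 - 1, hi2 + 2)
    set t4 : Int × Int := (lo3 - 1, hi3 + 2)
    have hsubkeys : ∀ p ∈ pvKeysL 4 data, p ∈ pvBox4 t1 t2 t3 t4 := by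
      intro p hp
      rw [pvKeysL, List.mem_flatMap] at hp
      obtain ⟨c, hc, hp⟩ := hp
      rw [List.mem_map] at hp
      obtain ⟨o, ho, rfl⟩ := hp
      obtain ⟨a, b, c2, d2, rfl⟩ := pvShape4 c (by have := hlen c hc; omega)
      obtain ⟨u, v, w, s, rfl⟩ := pvShape4 o (pvOffsets4_len o ho)
      have hbnd := pvOffsets4_bounds _ ho
      have hu := hbnd u (by simp); have hv := hbnd v (by simp)
      have hw := hbnd w (by simp); have hs := hbnd s (by simp)
      have hb' := hb _ hc
      simp only [List.getD_cons_zero, List.getD_cons_succ] at hb'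
      rw [pvMem_box4]
      refine ⟨a + u, b + v, c2 + w, d2 + s, ?_, ?_, ?_, ?_, by simp [pvVadd]⟩ <;>
        simp [t1, t2, t3, t4] <;> omega
    have hsubdata : ∀ p ∈ data, p ∈ pvBox4 t1 t2 t3 t4 := by
      intro p hp
      obtain ⟨a, b, c2, d2, rfl⟩ := pvShape4 p (by have := hlen p hp; omega)
      have hb' := hb _ hp
      simp only [List.getD_cons_zero, List.getD_cons_succ] at hb'
      rw [pvMem_box4]
      refine ⟨a, b, c2, d2, ?_, ?_, ?_, ?_, rfl⟩ <;> simp [t1, t2, t3, t4] <;> omega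
    have hrulebox : ∀ p, pvRule 4 data p = true → p ∈ pvBox4 t1 t2 t3 t4 := by
      intro p hr
      by_cases hd : p ∈ data
      · exact hsubdata p hd
      · rw [pvRule, if_neg (by simpa using hd), decide_eq_true_eq] at hr
        have hcnt := pvKeysL_count 4 (Or.inr rfl) data hlen p
        have : p ∈ pvKeysL 4 data := List.count_pos_iff.mp (by omega)
        exact hsubkeys p this
    have hboxlen : ∀ p ∈ pvBox4 t1 t2 t3 t4, (p.length : Int) = 4 := by
      intro p hp
      obtain ⟨x, y, z, w, _, _, _, _, rfl⟩ := (pvMem_box4 t1 t2 t3 t4 p).mp hp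
      rfl
    refine ⟨(pvBox4 t1 t2 t3 t4).filter (pvRule 4 data), ?_, ?_, ?_, ?_, ?_⟩
    · rw [if_neg (by norm_num), if_pos rfl]
      exact pvCalc4 data hnd hlen t1 t2 t3 t4 ht
    · exact (pvStep_eq 4 (Or.inr rfl) data _ hnd hlen (pvBox4_pairwise _ _ _ _) hsubkeys).symm
    · exact (pvBox4_nodup t1 t2 t3 t4).filter _
    · intro r hr; exact hboxlen r (List.mem_filter.mp hr).1
    · exact pvStepFinset 4 (Or.inr rfl) data hnd hlen _ hrulebox hboxlen

-- ---- the iterated loop ----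

lemma pvIter (n : Int) (hn : n = 3 ∨ n = 4) (m : Nat) :
    ∀ (data : List (List Int)), data.Nodup → (∀ r ∈ data, (r.length : Int) = n) →
      (∀ k < m, (pvLifeStep n)^[k] data.toFinset ≠ ∅) →
      ∃ out : List (List Int),
        (List.range m).foldl (fun st _ => st.bind fun d =>
            if n = 3 then pvCalculate3d d else if n = 4 then pvCalculate4d d else some d)
          (some data) = some out ∧
        out = (List.range m).foldl (fun active _ => pvStep (pvOffsets n) active) data ∧
        out.Nodup ∧ (∀ r ∈ out, (r.length : Int) = n) ∧
        out.toFinset = (pvLifeStep n)^[m] data.toFinset := by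
  induction m with
  | zero => intro data hnd hlen _; exact ⟨data, rfl, rfl, hnd, hlen, rfl⟩
  | succ m ih =>
    intro data hnd hlen hgen
    obtain ⟨out, hA, hB, hndo, hleno, hfin⟩ := ih data hnd hlen (fun k hk => hgen k (by omega))
    have hone : out ≠ [] := by
      intro h
      apply hgen m (by omega)
      rw [← hfin, h]
      rfl
    obtain ⟨out', hstep, hstepB, hnd', hlen', hfin'⟩ := pvOneStep n hn out hndo hone hleno
    refine ⟨out', ?_, ?_, hnd', hlen', ?_⟩
    · rw [List.range_succ, List.foldl_append, hA]
      simp only [List.foldl_cons, List.foldl_nil, Option.bind_some]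
      exact hstep
    · rw [List.range_succ, List.foldl_append, ← hB]
      simp only [List.foldl_cons, List.foldl_nil]
      exact hstepB
    · rw [hfin', hfin, ← Function.iterate_succ_apply' (pvLifeStep n) m]

-- ---- the no-op loop for nD ∉ {3, 4} ----

lemma pvSolve_other (data : List (List Int)) (steps nD : Int) (h3 : nD ≠ 3) (h4 : nD ≠ 4) :
    solve data steps nD = data := by
  have hfix : ∀ (l : List Nat) (st : Option (List (List Int))),
      l.foldl (fun st _ => st.bind fun d =>
        if nD = 3 then pvCalculate3d d else if nD = 4 then pvCalculate4d d else some d) st = st := by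
    intro l
    induction l with
    | nil => intro st; rfl
    | cons a t ih =>
      intro st
      rw [List.foldl_cons]
      have : (st.bind fun d => if nD = 3 then pvCalculate3d d
          else if nD = 4 then pvCalculate4d d else some d) = st := by
        simp only [if_neg h3, if_neg h4]
        cases st <;> rfl
      rw [this, ih]
  rw [solve, hfix]

theorem solve_spec : Claim_equal_solve := by
  unfold Claim_equal_solve
  intro data steps nD _ hpre
  unfold Spec_solve
  obtain ⟨hnd, hcase⟩ := hpre
  by_cases hs0 : steps ≤ 0
  · rw [solve_alt, if_pos (Or.inl hs0)]
    simp [solve, Int.toNat_of_nonpos hs0]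
  · rcases hcase with (hs | ⟨h3, h4⟩) | ⟨hn34, hlen, hgen⟩
    · exact absurd hs hs0
    · rw [solve_alt, if_pos (Or.inr (by tauto))]
      exact pvSolve_other data steps nD h3 h4
    · obtain ⟨out, hA, hB, _, _, _⟩ :=
        pvIter nD hn34 steps.toNat data hnd hlen (by simpa [pvGens] using hgen)
      rw [solve, hA]
      rw [solve_alt, if_neg (by simp [hn34, hs0])]
      rw [pvFoldl_ignore (pvStep (pvOffsets nD)) (PySem.List.pyRange 0 steps 1)
        (List.range steps.toNat)
        (by rw [PySem.List.length_pyRange_one, List.length_range]; congr 1; omega) data]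
      exact hB
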